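-- pv_equiv track=rewrite | github.com/aknob/AfpMaster | AfpBase/AfpUtilities/AfpStringUtilities.py | Afp_getWords
-- ===== SOURCE A (Python) =====
-- def Afp_getWords(in_string, including=None):
--     words = []
--     split = in_string
--     str = ""
--     if including:
--         split = in_string.split(including)
--     else:
--         split = [in_string]
--     lastwords = None
--     for teilstr in split:
--         str = ""
--         currentwords = []
--         for s in teilstr:
--             if s.isalpha():
--                 str += s
--             else:
--                 if str:  currentwords.append(str)
--                 str = ""
--         if str: currentwords.append(str)
--         if not lastwords is None:
--             word = ""
--             if lastwords: word += lastwords[-1]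
--             word += including
--             if currentwords: word += currentwords[0]
--             words.append(word)
--         lastwords = currentwords
--     if including is None:
--         words = currentwords
--     return words
-- ===== SOURCE B (Python) =====
-- def Afp_getWords(in_string, including=None):
--     # same return values as the original; extraction is separated from pairing/joining
--     def words_of(seg):
--         res = []
--         i, n = 0, len(seg)
--         while i < n:
--             if seg[i].isalpha():
--                 j = i
--                 while j < n and seg[j].isalpha():
--                     j += 1
--                 res.append(seg[i:j])
--                 i = j
--             else:
--                 i += 1
--         return res
--     segments = in_string.split(including) if including else [in_string]
--     wordlists = [words_of(seg) for seg in segments]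
--     if including is None:
--         return wordlists[0]
--     return [(prev[-1] if prev else "") + including + (cur[0] if cur else "")
--             for prev, cur in zip(wordlists, wordlists[1:])]
-- ===== Notes on version B (the rewrite author's own statement) =====
-- stated objective: alternative
-- what changed: Replaces A's single interleaved loop with a lastwords accumulator by two separated phases: extract each segment's maximal isalpha runs into a list of word lists (index/run scan), then build the output in one zip pass over adjacent word-list pairs.
import Mathlib
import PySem

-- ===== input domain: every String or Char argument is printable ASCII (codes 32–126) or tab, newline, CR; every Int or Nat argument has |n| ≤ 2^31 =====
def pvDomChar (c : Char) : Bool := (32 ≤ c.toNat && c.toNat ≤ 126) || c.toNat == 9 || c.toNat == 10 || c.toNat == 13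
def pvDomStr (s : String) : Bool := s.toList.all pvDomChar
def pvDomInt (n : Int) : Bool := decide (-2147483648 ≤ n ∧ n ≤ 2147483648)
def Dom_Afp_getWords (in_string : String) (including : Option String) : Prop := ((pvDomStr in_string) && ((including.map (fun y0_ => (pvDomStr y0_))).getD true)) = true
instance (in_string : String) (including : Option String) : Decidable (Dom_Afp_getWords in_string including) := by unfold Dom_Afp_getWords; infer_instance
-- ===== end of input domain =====

-- B separates extraction from pairing: per-segment word lists first, then one zip pass
-- over adjacent pairs (alternative decomposition, same asymptotic cost).

-- ===== PORT A =====
-- inner `for s in teilstr` loop of A, together with the trailing `if str: currentwords.append(str)`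
-- flush; `str` is accumulated as a List Char (String.ofList at each append — exact for str concatenation)
def afpInnerA : List Char → List Char → List String → List String
  | [], str, cw => if str ≠ [] then cw ++ [String.ofList str] else cw
  | c :: rest, str, cw =>
    if PySem.Chars.isalpha c then afpInnerA rest (str ++ [c]) cw
    else afpInnerA rest [] (if str ≠ [] then cw ++ [String.ofList str] else cw)

-- one iteration of A's outer `for teilstr in split` loop; state = (words, lastwords, currentwords)
-- lastwords[-1] / currentwords[0] are guarded by nonemptiness in the Python, hence getLastD/headD
def afpStepA (including : Option String)
    (st : List String × Option (List String) × List String) (teilstr : String) :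
    List String × Option (List String) × List String :=
  let currentwords := afpInnerA teilstr.toList [] []
  let words :=
    match st.2.1 with
    | none => st.1
    | some lw =>
        st.1 ++ [((if lw ≠ [] then lw.getLastD "" else "") ++ including.getD "") ++
                 (if currentwords ≠ [] then currentwords.headD "" else "")]
  (words, some currentwords, currentwords)

def Afp_getWords (in_string : String) (including : Option String) : List String :=
  let split : List String :=
    match including with
    | some inc => if inc ≠ "" then (PySem.Str.split? in_string inc).getD [] else [in_string]  -- split? = none only for sep = "", excluded by the guard
    | none => [in_string]
  let r := split.foldl (afpStepA including) ([], none, [])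
  match including with
  | none => r.2.2      -- `words = currentwords`
  | some _ => r.1

-- ===== PORT B =====
-- Source B's words_of: index scan; the inner `while j` advance and the seg[i:j] slice are
-- transcribed as takeWhile/dropWhile of the isalpha run starting at the current index
def altWordsOf : List Char → List String
  | [] => []
  | c :: rest =>
    if PySem.Chars.isalpha c then
      String.ofList (c :: rest.takeWhile PySem.Chars.isalpha) ::
        altWordsOf (rest.dropWhile PySem.Chars.isalpha)
    else altWordsOf rest
  termination_by cs => cs.length
  decreasing_by
    · exact Nat.lt_succ_of_le (List.length_dropWhile_le _ _)
    · simp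

def Afp_getWords_alt (in_string : String) (including : Option String) : List String :=
  let segments : List String :=
    match including with
    | some inc => if inc ≠ "" then (PySem.Str.split? in_string inc).getD [] else [in_string]  -- split? = none only for sep = "", excluded by the guard
    | none => [in_string]
  let wordlists := segments.map (fun seg => altWordsOf seg.toList)
  match including with
  | none => wordlists.headD []      -- wordlists[0]; segments is the singleton [in_string] here
  | some inc =>
      (wordlists.zip (wordlists.drop 1)).map
        (fun p => ((if p.1 ≠ [] then p.1.getLastD "" else "") ++ inc) ++
                  (if p.2 ≠ [] then p.2.headD "" else ""))

-- ===== PRECONDITION & SPEC =====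
def Spec_Afp_getWords (in_string : String) (including : Option String) (out : List String) : Prop := out = Afp_getWords_alt in_string including
instance (in_string : String) (including : Option String) (out : List String) : Decidable (Spec_Afp_getWords in_string including out) := by unfold Spec_Afp_getWords; infer_instance

-- ===== CLAIM (what is proved, stated in full; the proofs are below) =====
def Claim_equal_Afp_getWords : Prop := ∀ (in_string : String) (including : Option String), Dom_Afp_getWords in_string including → Spec_Afp_getWords in_string including (Afp_getWords in_string including)

-- ===== LEMMAS AND PROOFS =====

-- A's inner accumulator loop computes the maximal-alpha-run extraction of B
theorem afpInnerA_eq_general (cs : List Char) : ∀ (str : List Char) (cw : List String),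
    afpInnerA cs str cw =
      cw ++ (if str = [] then altWordsOf cs
             else String.ofList (str ++ cs.takeWhile PySem.Chars.isalpha) ::
                  altWordsOf (cs.dropWhile PySem.Chars.isalpha)) := by
  induction cs with
  | nil =>
      intro str cw
      by_cases h : str = [] <;> simp [afpInnerA, altWordsOf, h]
  | cons c rest ih =>
      intro str cw
      by_cases ha : PySem.Chars.isalpha c
      · by_cases h : str = [] <;>
          simp [afpInnerA, ha, h, ih, altWordsOf]
      · by_cases h : str = [] <;>
          simp [afpInnerA, ha, h, ih, altWordsOf]

theorem afpInnerA_eq (cs : List Char) : afpInnerA cs [] [] = altWordsOf cs := by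
  simp [afpInnerA_eq_general]

-- the zip-with-next pairing, in exactly the shape of B's map
def pairsOf (inc : String) (wls : List (List String)) : List String :=
  (wls.zip (wls.drop 1)).map
    (fun p => ((if p.1 ≠ [] then p.1.getLastD "" else "") ++ inc) ++
              (if p.2 ≠ [] then p.2.headD "" else ""))

theorem pairsOf_cons_cons (inc : String) (w1 w2 : List String) (rest : List (List String)) :
    pairsOf inc (w1 :: w2 :: rest) =
      (((if w1 ≠ [] then w1.getLastD "" else "") ++ inc) ++
       (if w2 ≠ [] then w2.headD "" else "")) :: pairsOf inc (w2 :: rest) := by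
  simp [pairsOf]

-- invariant of A's outer loop once lastwords is set
theorem foldA_invariant (inc : String) (segs : List String) :
    ∀ (acc : List String) (lw : List String),
    segs.foldl (afpStepA (some inc)) (acc, some lw, lw) =
      (acc ++ pairsOf inc (lw :: segs.map (fun s => altWordsOf s.toList)),
       some ((segs.map (fun s => altWordsOf s.toList)).getLastD lw),
       (segs.map (fun s => altWordsOf s.toList)).getLastD lw) := by
  induction segs with
  | nil => intro acc lw; simp [pairsOf]
  | cons s rest ih =>
      intro acc lw
      have hstep : afpStepA (some inc) (acc, some lw, lw) s =
          (acc ++ [((if lw ≠ [] then lw.getLastD "" else "") ++ inc) ++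
                   (if altWordsOf s.toList ≠ [] then (altWordsOf s.toList).headD "" else "")],
           some (altWordsOf s.toList), altWordsOf s.toList) := by
        simp [afpStepA, afpInnerA_eq]
      simp only [List.foldl_cons, hstep, ih, List.map_cons, List.getLastD_cons,
        pairsOf_cons_cons, List.append_assoc, List.singleton_append]

-- ===== VERDICT (by name: the statement is the Claim_ definition above) =====
theorem Afp_getWords_spec : Claim_equal_Afp_getWords := by
  intro in_string including _
  unfold Spec_Afp_getWords Afp_getWords Afp_getWords_alt
  match including with
  | none =>
      simp [afpStepA, afpInnerA_eq]
  | some inc =>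
      by_cases hinc : inc = ""
      · simp [hinc, afpStepA]
      · simp only [hinc, ne_eq, not_false_iff, if_true]
        cases hsp : (PySem.Str.split? in_string inc).getD [] with
        | nil => simp
        | cons s rest =>
            have hfirst : afpStepA (some inc) ([], none, []) s =
                ([], some (altWordsOf s.toList), altWordsOf s.toList) := by
              simp [afpStepA, afpInnerA_eq]
            simp only [List.foldl_cons, hfirst, foldA_invariant, List.nil_append,
              List.map_cons]
            rfl
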